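-- pv_equiv track=rewrite | github.com/Quattro-Bajeena/4chan-notifier | parse_board_data.py | filter_threads
-- ===== SOURCE A (Python) =====
-- def filter_threads(threads, keywords: list, check_comment=True):
--     filtered = []
--     for thread in threads:
--         accept = False
--
--         for keyword in keywords:
--             if check_comment:
--                 if 'sub' in thread and keyword in thread['sub'].lower():
--                     accept = True
--                 if 'com' in thread and keyword in thread['com'].lower():
--                     accept = True
--
--             else:
--                 if 'sub' in thread and keyword in thread['sub'].lower():
--                     accept = True
--
--         if accept:
--             filtered.append(thread)
--     return filtered
-- ===== SOURCE B (Python) =====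
-- import re
--
--
-- def filter_threads(threads, keywords: list, check_comment=True):
--     # One compiled alternation of the escaped keywords replaces the per-keyword
--     # substring loop: one regex search per field.
--     if not keywords:
--         return []
--     pat = re.compile("|".join(re.escape(k) for k in keywords))
--
--     def hit(thread, key):
--         return key in thread and pat.search(thread[key].lower()) is not None
--
--     return [t for t in threads
--             if hit(t, 'sub') or (check_comment and hit(t, 'com'))]
-- ===== Notes on version B (the rewrite author's own statement) =====
-- stated objective: faster
-- what changed: Replaced the nested per-thread/per-keyword substring loop with boolean flag by a single compiled regex (alternation of escaped keywords) searched once per field, inside one filter comprehension with an early-out on the subject field.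
import Mathlib
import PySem

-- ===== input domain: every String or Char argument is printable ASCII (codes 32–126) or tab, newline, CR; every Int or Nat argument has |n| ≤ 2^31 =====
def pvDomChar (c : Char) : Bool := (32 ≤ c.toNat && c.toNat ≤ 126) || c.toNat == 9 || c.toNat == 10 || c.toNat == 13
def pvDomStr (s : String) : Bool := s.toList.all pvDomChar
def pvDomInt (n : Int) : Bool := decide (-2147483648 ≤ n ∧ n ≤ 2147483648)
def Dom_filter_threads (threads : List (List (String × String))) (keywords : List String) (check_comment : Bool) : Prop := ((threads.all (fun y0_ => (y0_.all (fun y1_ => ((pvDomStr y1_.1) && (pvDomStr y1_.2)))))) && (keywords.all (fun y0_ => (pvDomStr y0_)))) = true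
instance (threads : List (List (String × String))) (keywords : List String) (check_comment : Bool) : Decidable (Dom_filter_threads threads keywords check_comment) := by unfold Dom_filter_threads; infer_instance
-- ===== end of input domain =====

-- B replaces A's per-thread per-keyword flag loop with one compiled regex (alternation of
-- escaped keywords) searched once per field, collecting hits in a single filter pass.


-- ===== PORT A =====
-- 'sub' in thread / thread['sub'] on the dict (assoc list, first match) via List.lookup;
-- 'keyword in text' via PySem.Str.isIn, .lower() via PySem.Str.lower.
def pvFieldHas (thread : List (String × String)) (key : String) (keyword : String) : Bool :=
  match thread.lookup key with
  | some s => PySem.Str.isIn keyword (PySem.Str.lower s)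
  | none => false

def filter_threads (threads : List (List (String × String))) (keywords : List String) (check_comment : Bool) : List (List (String × String)) :=
  threads.foldl (fun filtered thread =>
    let accept :=
      keywords.foldl (fun accept keyword =>
        if check_comment then
          let accept := if pvFieldHas thread "sub" keyword then true else accept
          let accept := if pvFieldHas thread "com" keyword then true else accept
          accept
        else
          if pvFieldHas thread "sub" keyword then true else accept) false
    if accept then filtered ++ [thread] else filtered) []

-- ===== PORT B =====
-- Source B compiles re.compile('|'.join(re.escape(k) for k in keywords)) and tests
-- pat.search(text): for nonempty keywords this stdlib call is exactly "some keyword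
-- occurs as a substring of text", ported as List.any over PySem.Str.isIn.
def pvHit (keywords : List String) (thread : List (String × String)) (key : String) : Bool :=
  match thread.lookup key with
  | some s => keywords.any (fun k => PySem.Str.isIn k (PySem.Str.lower s))
  | none => false

def filter_threads_alt (threads : List (List (String × String))) (keywords : List String) (check_comment : Bool) : List (List (String × String)) :=
  if keywords.isEmpty then []
  else threads.filter (fun t => pvHit keywords t "sub" || (check_comment && pvHit keywords t "com"))

-- ===== PRECONDITION & SPEC =====
def Spec_filter_threads (threads : List (List (String × String))) (keywords : List String) (check_comment : Bool) (out : List (List (String × String))) : Prop := out = filter_threads_alt threads keywords check_comment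
instance (threads : List (List (String × String))) (keywords : List String) (check_comment : Bool) (out : List (List (String × String))) : Decidable (Spec_filter_threads threads keywords check_comment out) := by unfold Spec_filter_threads; infer_instance

-- ===== CLAIM (what is proved, stated in full; the proofs are below) =====
def Claim_equal_filter_threads : Prop := ∀ (threads : List (List (String × String))) (keywords : List String) (check_comment : Bool), Dom_filter_threads threads keywords check_comment → Spec_filter_threads threads keywords check_comment (filter_threads threads keywords check_comment)

-- ===== LEMMAS AND PROOFS =====
-- A's inner keyword loop computes: initial flag OR "some keyword hits sub (or com when check_comment)".
theorem pv_inner_loop (thread : List (String × String)) (check_comment : Bool)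
    (keywords : List String) (a : Bool) :
    keywords.foldl (fun accept keyword =>
        if check_comment then
          let accept := if pvFieldHas thread "sub" keyword then true else accept
          let accept := if pvFieldHas thread "com" keyword then true else accept
          accept
        else
          if pvFieldHas thread "sub" keyword then true else accept) a
      = (a || keywords.any (fun k =>
          pvFieldHas thread "sub" k || (check_comment && pvFieldHas thread "com" k))) := by
  induction keywords generalizing a with
  | nil => simp
  | cons k ks ih =>
    simp only [List.foldl_cons, List.any_cons, ih]
    cases check_comment <;> cases h1 : pvFieldHas thread "sub" k <;>
      cases h2 : pvFieldHas thread "com" k <;> cases a <;> simp [h1, h2]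

-- pvHit is the per-keyword field test, any-ed over keywords.
theorem pvHit_eq (keywords : List String) (thread : List (String × String)) (key : String) :
    pvHit keywords thread key = keywords.any (fun k => pvFieldHas thread key k) := by
  cases h : thread.lookup key <;> simp [pvHit, pvFieldHas, h]

-- any distributes over the disjunction of the two tests.
theorem pv_any_or {α : Type} (l : List α) (p q : α → Bool) (c : Bool) :
    l.any (fun x => p x || c && q x) = (l.any p || c && l.any q) := by
  induction l with
  | nil => simp
  | cons x xs ih =>
    simp only [List.any_cons, ih]
    cases c <;> cases p x <;> cases q x <;> simp

-- ===== VERDICT (by name: the statement is the Claim_ definition above) =====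
theorem filter_threads_spec : Claim_equal_filter_threads := by
  intro threads keywords check_comment _
  show filter_threads threads keywords check_comment = filter_threads_alt threads keywords check_comment
  unfold filter_threads filter_threads_alt
  simp only [pv_inner_loop, Bool.false_or]
  rw [PySem.List.foldl_append_if_eq_filter]
  cases keywords with
  | nil => simp
  | cons k ks =>
    simp only [List.isEmpty_cons, Bool.false_eq_true, if_false, List.nil_append]
    congr 1
    funext t
    simp only [pv_any_or, pvHit_eq]
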